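-- pv_equiv track=rewrite | github.com/jdnewmil/aocpy | aocpy/aoc2024/day09.py | compact_expanded_map
-- ===== SOURCE A (Python) =====
-- FREE: int = -1
--
-- def seek_free_index(exp_disk_map: list[int], start: int, end: int) -> int:
--     while start < end:
--         if FREE == exp_disk_map[start]:
--             return start
--         start += 1
--     return -1  # all free space is after end pointer
--
-- def seek_nonfree_index(
--     exp_disk_map: list[int]
--     , start: int
--     , end: int
-- ) -> int:
--     while start < end:
--         if FREE != exp_disk_map[end]:
--             return end
--         end -= 1
--     return -1
--
-- def compact_expanded_map(exp_disk_map: list[int]) -> list[int]: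
--     start = 0
--     end = len(exp_disk_map) - 1
--     result = exp_disk_map.copy()
--     while True:
--         end = seek_nonfree_index(
--             exp_disk_map=result, start=start, end=end)
--         if end < 0:
--             return result
--         start = seek_free_index(
--             exp_disk_map=result, start=start, end=end)
--         if start < 0:
--             return result
--         result[start] = result[end]
--         result[end] = FREE
-- ===== SOURCE B (Python) =====
-- FREE: int = -1
--
-- def compact_expanded_map(exp_disk_map: list[int]) -> list[int]:
--     # Staged passes: count the blocks, collect the tail donors (reversed),
--     # then fill the free slots of the prefix from the donor list.
--     m = sum(1 for v in exp_disk_map if v != FREE)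
--     donors = [v for v in reversed(exp_disk_map[m:]) if v != FREE]
--     out = []
--     j = 0
--     for v in exp_disk_map[:m]:
--         if v != FREE:
--             out.append(v)
--         else:
--             out.append(donors[j])
--             j += 1
--     out.extend([FREE] * (len(exp_disk_map) - m))
--     return out
-- ===== Notes on version B (the rewrite author's own statement) =====
-- stated objective: alternative
-- what changed: A simulates the compaction by repeatedly seeking the first free slot and last block and swapping them in a mutable copy; B never simulates moves: it counts the blocks (m), collects the blocks of the tail xs[m:] in reverse as a donor list, and in one fill pass writes the prefix xs[:m] with free slots replaced by successive donors, then pads with FREE.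
import Mathlib
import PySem

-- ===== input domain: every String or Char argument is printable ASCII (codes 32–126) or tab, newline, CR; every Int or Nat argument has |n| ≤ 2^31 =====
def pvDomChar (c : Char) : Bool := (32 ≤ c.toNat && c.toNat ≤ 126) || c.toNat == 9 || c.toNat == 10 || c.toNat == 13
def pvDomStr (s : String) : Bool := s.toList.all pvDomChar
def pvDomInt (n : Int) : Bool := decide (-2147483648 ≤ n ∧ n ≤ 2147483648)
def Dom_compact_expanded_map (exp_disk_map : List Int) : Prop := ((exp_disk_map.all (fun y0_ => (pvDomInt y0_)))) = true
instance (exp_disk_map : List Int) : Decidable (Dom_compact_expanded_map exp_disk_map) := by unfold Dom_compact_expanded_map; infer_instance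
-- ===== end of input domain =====

-- A simulates the compaction by repeated seek-and-swap in a mutable copy; B computes the
-- final layout directly: count the blocks, collect the reversed tail blocks as donors,
-- fill the prefix's free slots from the donor list, pad with FREE (objective: alternative).

-- ===== PORT A =====

-- while start < end: if FREE == m[start]: return start; start += 1; return -1
-- (every call site indexes in range, so the pyGetD default 0 is never the read value)
def seek_free_index (exp_disk_map : List Int) (start fin : Int) : Int :=
  if _h : start < fin then
    if (-1 : Int) = PySem.List.pyGetD exp_disk_map start 0 then start
    else seek_free_index exp_disk_map (start + 1) fin
  else -1
termination_by (fin - start).toNat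
decreasing_by omega

-- while start < end: if FREE != m[end]: return end; end -= 1; return -1
def seek_nonfree_index (exp_disk_map : List Int) (start fin : Int) : Int :=
  if _h : start < fin then
    if (-1 : Int) ≠ PySem.List.pyGetD exp_disk_map fin 0 then fin
    else seek_nonfree_index exp_disk_map start (fin - 1)
  else -1
termination_by (fin - start).toNat
decreasing_by omega

-- the 'while True' loop of A; fuel is a totality guard only (length+2 iterations are
-- proved sufficient below: the potential pvPhi strictly decreases each iteration)
def compact_loop : Nat → List Int → Int → Int → List Int
  | 0, result, _, _ => result
  | fuel + 1, result, start, fin =>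
    let fin' := seek_nonfree_index result start fin
    if fin' < 0 then result
    else
      let start' := seek_free_index result start fin'
      if start' < 0 then result
      else
        compact_loop fuel
          (PySem.List.pySetD
            (PySem.List.pySetD result start' (PySem.List.pyGetD result fin' 0))
            fin' (-1))
          start' fin'

def compact_expanded_map (exp_disk_map : List Int) : List Int :=
  compact_loop (exp_disk_map.length + 2) exp_disk_map 0 ((exp_disk_map.length : Int) - 1)

-- ===== PORT B =====

-- for v in xs[:m]: append v if non-free else donors[j]; j += 1
def pvFillLoop (donors : List Int) : List Int → Int → List Int
  | [], _ => []
  | v :: rest, j =>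
    if v != -1 then v :: pvFillLoop donors rest j
    else PySem.List.pyGetD donors j 0 :: pvFillLoop donors rest (j + 1)

def compact_expanded_map_alt (exp_disk_map : List Int) : List Int :=
  -- m = sum(1 for v in xs if v != FREE)
  let m : Int := exp_disk_map.foldl (fun a v => if v != -1 then a + 1 else a) 0
  -- donors = [v for v in reversed(xs[m:]) if v != FREE]   (m ≥ 0, so xs[m:] is drop)
  let donors := ((exp_disk_map.drop m.toNat).reverse).filter (fun v => v != -1)
  let out := pvFillLoop donors (exp_disk_map.take m.toNat) 0
  out ++ List.replicate (exp_disk_map.length - m.toNat) (-1)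

-- ===== PRECONDITION & SPEC =====
def Spec_compact_expanded_map (exp_disk_map : List Int) (out : List Int) : Prop := out = compact_expanded_map_alt exp_disk_map
instance (exp_disk_map : List Int) (out : List Int) : Decidable (Spec_compact_expanded_map exp_disk_map out) := by unfold Spec_compact_expanded_map; infer_instance

-- ===== CLAIM (what is proved, stated in full; the proofs are below) =====
def Claim_equal_compact_expanded_map : Prop := ∀ (exp_disk_map : List Int), Dom_compact_expanded_map exp_disk_map → Spec_compact_expanded_map exp_disk_map (compact_expanded_map exp_disk_map)

-- ===== LEMMAS AND PROOFS =====

-- the compaction of one segment, consuming the segment from both ends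
def pvPack : List Int → List Int
  | [] => []
  | x :: rest =>
    if x = -1 then
      match hlast : rest.getLast? with
      | none => []
      | some y => if y = -1 then pvPack (-1 :: rest.dropLast) else y :: pvPack rest.dropLast
    else x :: pvPack rest
termination_by xs => xs.length
decreasing_by
  · have h0 : rest.length ≠ 0 := by intro he; rw [List.length_eq_zero_iff] at he; subst he; simp at hlast
    simp only [List.length_dropLast, List.length_cons]; omega
  · have h0 : rest.length ≠ 0 := by intro he; rw [List.length_eq_zero_iff] at he; subst he; simp at hlast
    simp only [List.length_dropLast, List.length_cons]; omega
  · simp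

-- the compacted segment padded with FREE back to its original length
def pvPad (zs : List Int) : List Int :=
  pvPack zs ++ List.replicate (zs.length - (pvPack zs).length) (-1)

-- the contiguous segment res[a..b] (inclusive ends, Int indices)
def pvSeg (res : List Int) (a b : Int) : List Int :=
  (res.take (b + 1).toNat).drop a.toNat

-- potential bounding the remaining number of A-loop iterations
def pvPhi (res : List Int) (s e : Int) : Nat :=
  (e + 1 - s).toNat + (if PySem.List.pyGetD res s 0 = -1 then 1 else 0)

theorem pvPack_nil : pvPack [] = [] := by simp [pvPack]

theorem pvPack_cons_nonfree (x : Int) (zs : List Int) (h : x ≠ -1) :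
    pvPack (x :: zs) = x :: pvPack zs := by
  rw [pvPack]; simp [h]

theorem pvPack_free_singleton : pvPack [-1] = [] := by
  rw [pvPack]; simp

theorem pvPack_free_none (zs : List Int) (h : zs.getLast? = none) :
    pvPack (-1 :: zs) = [] := by
  rw [pvPack, if_pos rfl]
  split
  · rfl
  · rename_i y heq; rw [h] at heq; cases heq

theorem pvPack_free_last_free (zs : List Int) (h : zs.getLast? = some (-1)) :
    pvPack (-1 :: zs) = pvPack (-1 :: zs.dropLast) := by
  rw [pvPack, if_pos rfl]
  split
  · rename_i heq; rw [h] at heq; cases heq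
  · rename_i y heq; rw [h] at heq; cases heq; simp

theorem pvPack_free_last_nonfree (zs : List Int) (y : Int) (h : zs.getLast? = some y)
    (hy : y ≠ -1) : pvPack (-1 :: zs) = y :: pvPack zs.dropLast := by
  rw [pvPack, if_pos rfl]
  split
  · rename_i heq; rw [h] at heq; cases heq
  · rename_i y' heq; rw [h] at heq; cases heq; simp [hy]

theorem pvPack_snoc_free (ys : List Int) : pvPack (ys ++ [-1]) = pvPack ys := by
  induction ys using pvPack.induct with
  | case1 => simpa [pvPack_nil] using pvPack_free_none [] rfl
  | case5 x rest hx ih =>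
    rw [List.cons_append, pvPack_cons_nonfree _ _ hx, pvPack_cons_nonfree _ _ hx, ih]
  | case2 rest h =>
    rw [List.cons_append, pvPack_free_last_free (rest ++ [-1]) (by simp),
      List.dropLast_concat]
  | case3 rest h ih =>
    rw [List.cons_append, pvPack_free_last_free (rest ++ [-1]) (by simp),
      List.dropLast_concat]
  | case4 rest y h hy ih =>
    rw [List.cons_append, pvPack_free_last_free (rest ++ [-1]) (by simp),
      List.dropLast_concat]

theorem pvPack_cons_free_snoc (ys : List Int) (v : Int) (hv : v ≠ -1) :
    pvPack (-1 :: (ys ++ [v])) = v :: pvPack ys := by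
  rw [pvPack, if_pos rfl]
  split
  · rename_i heq; simp at heq
  · rename_i y heq
    rw [List.getLast?_concat] at heq
    cases heq
    simp [hv]

theorem pvPack_length_le (zs : List Int) : (pvPack zs).length ≤ zs.length := by
  induction zs using pvPack.induct with
  | case1 => simp [pvPack_nil]
  | case5 x rest hx ih => rw [pvPack_cons_nonfree _ _ hx]; simpa using ih
  | case2 rest h => rw [pvPack_free_none _ h]; simp
  | case3 rest h ih =>
    rw [pvPack_free_last_free _ h]
    have h0 : rest ≠ [] := by intro he; subst he; cases h
    have h1 : rest.length ≠ 0 := by simpa [List.length_eq_zero_iff] using h0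
    simp only [List.length_cons, List.length_dropLast] at ih ⊢
    omega
  | case4 rest y h hy ih =>
    rw [pvPack_free_last_nonfree _ _ h hy]
    have h0 : rest ≠ [] := by intro he; subst he; cases h
    have h1 : rest.length ≠ 0 := by simpa [List.length_eq_zero_iff] using h0
    simp only [List.length_cons, List.length_dropLast] at ih ⊢
    omega

theorem pvPack_append_nonfree (ys zs : List Int) (h : ∀ y ∈ ys, y ≠ -1) :
    pvPack (ys ++ zs) = ys ++ pvPack zs := by
  induction ys with
  | nil => simp
  | cons a as ih =>
    have ha : a ≠ -1 := h a (by simp)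
    rw [List.cons_append, pvPack_cons_nonfree _ _ ha, ih (fun y hy => h y (by simp [hy]))]
    simp

theorem pvPack_append_allfree (ys zs : List Int) (h : ∀ y ∈ zs, y = -1) :
    pvPack (ys ++ zs) = pvPack ys := by
  induction zs using List.reverseRecOn with
  | nil => simp
  | append_singleton as a ih =>
    have ha : a = -1 := h a (by simp)
    subst ha
    rw [← List.append_assoc, pvPack_snoc_free, ih (fun y hy => h y (by simp [hy]))]

theorem pvPack_allfree (zs : List Int) (h : ∀ y ∈ zs, y = -1) : pvPack zs = [] := by
  have := pvPack_append_allfree [] zs h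
  simpa [pvPack_nil] using this

theorem pvPad_allfree (zs : List Int) (h : ∀ y ∈ zs, y = -1) : pvPad zs = zs := by
  unfold pvPad
  rw [pvPack_allfree zs h]
  have hz : zs = List.replicate zs.length (-1) := List.eq_replicate_iff.mpr ⟨rfl, h⟩
  simpa using hz.symm

theorem pvPad_append_allfree (ys zs : List Int) (h : ∀ y ∈ zs, y = -1) :
    pvPad (ys ++ zs) = pvPad ys ++ zs := by
  unfold pvPad
  rw [pvPack_append_allfree ys zs h]
  have hle := pvPack_length_le ys
  have hz : zs = List.replicate zs.length (-1) := List.eq_replicate_iff.mpr ⟨rfl, h⟩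
  rw [List.length_append]
  have : ys.length + zs.length - (pvPack ys).length
      = (ys.length - (pvPack ys).length) + zs.length := by omega
  rw [this, List.replicate_add, ← List.append_assoc, ← hz]

theorem pvPad_append_nonfree (ys zs : List Int) (h : ∀ y ∈ ys, y ≠ -1) :
    pvPad (ys ++ zs) = ys ++ pvPad zs := by
  unfold pvPad
  rw [pvPack_append_nonfree ys zs h, List.length_append, List.length_append]
  have : ys.length + zs.length - (ys.length + (pvPack zs).length)
      = zs.length - (pvPack zs).length := by omega
  rw [this, List.append_assoc]

theorem pvPad_nil : pvPad [] = [] := by simp [pvPad, pvPack_nil]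

theorem pvPad_singleton (x : Int) : pvPad [x] = [x] := by
  by_cases hx : x = -1
  · subst hx; simp [pvPad, pvPack_free_singleton]
  · simp [pvPad, pvPack_cons_nonfree _ _ hx, pvPack_nil]

-- ===== segment lemmas =====

theorem pvSeg_empty (res : List Int) (a b : Int) (h : (b+1).toNat ≤ a.toNat) :
    pvSeg res a b = [] := by
  unfold pvSeg
  apply List.drop_eq_nil_of_le
  simp only [List.length_take]
  omega

theorem pvSeg_split (res : List Int) (a b c : Int) (ha : 0 ≤ a) (hab : a ≤ b + 1)
    (hbc : b ≤ c) (hb : b + 1 ≤ res.length) :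
    pvSeg res a c = pvSeg res a b ++ pvSeg res (b + 1) c := by
  unfold pvSeg
  have h1 : (res.take (c + 1).toNat).take (b + 1).toNat = res.take (b + 1).toNat := by
    rw [List.take_take]; congr 1; omega
  conv_lhs => rw [← List.take_append_drop (b + 1).toNat (res.take (c + 1).toNat)]
  rw [h1, List.drop_append_of_le_length (by simp only [List.length_take]; omega)]

theorem pvSeg_singleton (res : List Int) (a : Int) (ha : 0 ≤ a) (hlt : a < res.length) :
    pvSeg res a a = [res[a.toNat]'(by omega)] := by
  unfold pvSeg
  have h1 : (a + 1).toNat = a.toNat + 1 := by omega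
  have h2 : a.toNat < res.length := by omega
  rw [h1, List.take_add_one]
  rw [List.drop_append_of_le_length (by simp only [List.length_take]; omega)]
  rw [List.drop_eq_nil_of_le (by simp only [List.length_take]; omega)]
  simp [List.getElem?_eq_getElem h2]

theorem pvSeg_self (res : List Int) : pvSeg res 0 ((res.length : Int) - 1) = res := by
  unfold pvSeg
  have h1 : ((res.length : Int) - 1 + 1).toNat = res.length := by omega
  simp only [h1, Int.toNat_zero, List.drop_zero, List.take_length]

theorem pvSeg_mem (res : List Int) (a b : Int) (ha : 0 ≤ a) (hb : b + 1 ≤ res.length)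
    {y : Int} (hy : y ∈ pvSeg res a b) :
    ∃ j : Int, a ≤ j ∧ j ≤ b ∧ PySem.List.pyGetD res j 0 = y := by
  unfold pvSeg at hy
  obtain ⟨k, hk, hky⟩ := List.mem_iff_getElem.mp hy
  have hlen : k < (b + 1).toNat - a.toNat := by
    have hk2 := hk
    simp only [List.length_drop, List.length_take] at hk2
    omega
  have hb' : (b + 1).toNat ≤ res.length := by omega
  have hik : a.toNat + k < res.length := by omega
  refine ⟨((a.toNat + k : Nat) : Int), by omega, by omega, ?_⟩
  rw [PySem.List.pyGetD_natCast, List.getD_eq_getElem res 0 hik]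
  rw [List.getElem_drop, List.getElem_take] at hky
  exact hky

theorem pvSeg_ext (res1 res2 : List Int) (a b : Int)
    (hlen : res1.length = res2.length)
    (h : ∀ j : Nat, a.toNat ≤ j → j < (b + 1).toNat → res1[j]? = res2[j]?) :
    pvSeg res1 a b = pvSeg res2 a b := by
  unfold pvSeg
  apply List.ext_getElem?
  intro i
  simp only [List.getElem?_drop, List.getElem?_take]
  split
  · exact h _ (by omega) (by omega)
  · rfl

theorem pvSeg_allfree_of (res : List Int) (a b : Int) (ha : 0 ≤ a)
    (hb : b + 1 ≤ res.length)
    (h : ∀ j : Int, a ≤ j → j ≤ b → PySem.List.pyGetD res j 0 = -1) :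
    ∀ y ∈ pvSeg res a b, y = -1 := by
  intro y hy
  obtain ⟨j, h1, h2, h3⟩ := pvSeg_mem res a b ha hb hy
  rw [← h3]; exact h j h1 h2

theorem pvSeg_nonfree_of (res : List Int) (a b : Int) (ha : 0 ≤ a)
    (hb : b + 1 ≤ res.length)
    (h : ∀ j : Int, a ≤ j → j ≤ b → PySem.List.pyGetD res j 0 ≠ -1) :
    ∀ y ∈ pvSeg res a b, y ≠ -1 := by
  intro y hy
  obtain ⟨j, h1, h2, h3⟩ := pvSeg_mem res a b ha hb hy
  rw [← h3]; exact h j h1 h2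

theorem pvTake_set (l : List Int) (i : Nat) (v : Int) (n : Nat) (h : n ≤ i) :
    (l.set i v).take n = l.take n := by
  apply List.ext_getElem?
  intro k
  simp only [List.getElem?_take]
  split
  · exact List.getElem?_set_ne (by omega)
  · rfl

theorem pvDrop_set (l : List Int) (i : Nat) (v : Int) (n : Nat) (h : i < n) :
    (l.set i v).drop n = l.drop n := by
  apply List.ext_getElem?
  intro k
  simp only [List.getElem?_drop]
  exact List.getElem?_set_ne (by omega)

theorem pvRecompose (res : List Int) (s e : Int) (h1 : 0 ≤ s) (h2 : s ≤ e + 1)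
    (h3 : e + 1 ≤ res.length) :
    res.take s.toNat ++ pvSeg res s e ++ res.drop (e + 1).toNat = res := by
  unfold pvSeg
  have ht : res.take s.toNat = (res.take (e + 1).toNat).take s.toNat := by
    rw [List.take_take]; congr 1; omega
  rw [ht, List.take_append_drop, List.take_append_drop]

theorem pvTake_decomp (res : List Int) (s t : Int) (hs : 0 ≤ s) (hst : s ≤ t) :
    res.take t.toNat = res.take s.toNat ++ pvSeg res s (t - 1) := by
  unfold pvSeg
  have h1 : (t - 1 + 1).toNat = t.toNat := by omega
  rw [h1]
  have ht : res.take s.toNat = (res.take t.toNat).take s.toNat := by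
    rw [List.take_take]; congr 1; omega
  rw [ht, List.take_append_drop]

theorem pvDrop_decomp (res : List Int) (t u : Int) (ht : 0 ≤ t) (htu : t ≤ u)
    (hu : u ≤ res.length) :
    res.drop t.toNat = pvSeg res t (u - 1) ++ res.drop u.toNat := by
  unfold pvSeg
  have h1 : (u - 1 + 1).toNat = u.toNat := by omega
  rw [h1]
  conv_lhs => rw [← List.take_append_drop u.toNat res]
  rw [List.drop_append_of_le_length (by simp only [List.length_take]; omega)]

theorem pvPad_swap (mid : List Int) (v : Int) (hv : v ≠ -1) :
    pvPad (-1 :: (mid ++ [v])) = pvPad (v :: (mid ++ [-1])) := by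
  unfold pvPad
  rw [pvPack_cons_free_snoc mid v hv, pvPack_cons_nonfree _ _ hv, pvPack_snoc_free]
  simp

-- ===== seek-helper characterisations =====

theorem seekF_spec (res : List Int) (s e : Int) (hs : 0 ≤ s) :
    (seek_free_index res s e = -1 ∧
      ∀ j : Int, s ≤ j → j < e → PySem.List.pyGetD res j 0 ≠ -1) ∨
    (s ≤ seek_free_index res s e ∧ seek_free_index res s e < e ∧
      PySem.List.pyGetD res (seek_free_index res s e) 0 = -1 ∧
      ∀ j : Int, s ≤ j → j < seek_free_index res s e → PySem.List.pyGetD res j 0 ≠ -1) := by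
  revert hs
  induction s using seek_free_index.induct (exp_disk_map := res) (fin := e) with
  | case1 s h1 h2 =>
    intro hs
    rw [seek_free_index, dif_pos h1, if_pos h2]
    exact Or.inr ⟨le_refl s, h1, h2.symm, fun j hj1 hj2 => absurd hj2 (by omega)⟩
  | case2 s h1 h2 ih =>
    intro hs
    rw [seek_free_index, dif_pos h1, if_neg h2]
    have hget : PySem.List.pyGetD res s 0 ≠ -1 := fun hc => h2 hc.symm
    rcases ih (by omega) with ⟨hm, hall⟩ | ⟨hr1, hr2, hr3, hall⟩
    · refine Or.inl ⟨hm, fun j hj1 hj2 => ?_⟩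
      rcases eq_or_lt_of_le hj1 with rfl | hlt
      · exact hget
      · exact hall j (by omega) hj2
    · refine Or.inr ⟨by omega, hr2, hr3, fun j hj1 hj2 => ?_⟩
      rcases eq_or_lt_of_le hj1 with rfl | hlt
      · exact hget
      · exact hall j (by omega) hj2
  | case3 s h1 =>
    intro _
    rw [seek_free_index, dif_neg h1]
    exact Or.inl ⟨rfl, fun j hj1 hj2 => absurd (lt_of_le_of_lt hj1 hj2) h1⟩

theorem seekNF_spec (res : List Int) (s e : Int) :
    (seek_nonfree_index res s e = -1 ∧
      ∀ j : Int, s < j → j ≤ e → PySem.List.pyGetD res j 0 = -1) ∨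
    (s < seek_nonfree_index res s e ∧ seek_nonfree_index res s e ≤ e ∧
      PySem.List.pyGetD res (seek_nonfree_index res s e) 0 ≠ -1 ∧
      ∀ j : Int, seek_nonfree_index res s e < j → j ≤ e → PySem.List.pyGetD res j 0 = -1) := by
  induction e using seek_nonfree_index.induct (exp_disk_map := res) (start := s) with
  | case1 e h1 h2 =>
    rw [seek_nonfree_index, dif_pos h1, if_pos h2]
    exact Or.inr ⟨h1, le_refl e, fun hc => h2 hc.symm,
      fun j hj1 hj2 => absurd hj1 (by omega)⟩
  | case2 e h1 h2 ih =>
    rw [seek_nonfree_index, dif_pos h1, if_neg h2]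
    have hget : PySem.List.pyGetD res e 0 = -1 := by
      by_contra hc; exact h2 (fun he => hc he.symm)
    rcases ih with ⟨hm, hall⟩ | ⟨hr1, hr2, hr3, hall⟩
    · refine Or.inl ⟨hm, fun j hj1 hj2 => ?_⟩
      rcases eq_or_lt_of_le hj2 with rfl | hlt
      · exact hget
      · exact hall j hj1 (by omega)
    · refine Or.inr ⟨hr1, by omega, hr3, fun j hj1 hj2 => ?_⟩
      rcases eq_or_lt_of_le hj2 with rfl | hlt
      · exact hget
      · exact hall j hj1 (by omega)
  | case3 e h1 =>
    rw [seek_nonfree_index, dif_neg h1]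
    exact Or.inl ⟨rfl, fun j hj1 hj2 => absurd (lt_of_lt_of_le hj1 hj2) h1⟩

-- ===== A-side main loop invariant =====

theorem compact_loop_spec (fuel : Nat) :
    ∀ (res : List Int) (s e : Int), 0 ≤ s → s ≤ e + 1 → e < res.length →
    pvPhi res s e < fuel →
    compact_loop fuel res s e =
      res.take s.toNat ++ pvPad (pvSeg res s e) ++ res.drop (e + 1).toNat := by
  induction fuel with
  | zero => intro res s e _ _ _ hf; exact absurd hf (by omega)
  | succ fuel ih =>
    intro res s e hs hse hel hf
    rcases seekNF_spec res s e with ⟨hm, hallE⟩ | ⟨he1, he2, he3, hallE⟩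
    · simp only [compact_loop, hm]
      rw [if_pos (by norm_num : (-1 : Int) < 0)]
      by_cases hcase : s ≤ e
      · have hfr : ∀ y ∈ pvSeg res (s + 1) e, y = -1 :=
          pvSeg_allfree_of res (s + 1) e (by omega) (by omega)
            (fun j hj1 hj2 => hallE j (by omega) hj2)
        have hpad : pvPad (pvSeg res s e) = pvSeg res s e := by
          rw [pvSeg_split res s s e hs (by omega) hcase (by omega)]
          rw [pvPad_append_allfree _ _ hfr]
          rw [pvSeg_singleton res s hs (by omega), pvPad_singleton]
        rw [hpad, pvRecompose res s e hs hse (by omega)]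
      · rw [pvSeg_empty res s e (by omega), pvPad_nil, List.append_nil,
          show (e + 1).toNat = s.toNat from by omega, List.take_append_drop]
    · simp only [compact_loop]
      rw [if_neg (by omega : ¬ seek_nonfree_index res s e < 0)]
      set e' := seek_nonfree_index res s e with hE
      have he'0 : 0 ≤ e' := by omega
      have he'l : e' < (res.length : Int) := by omega
      rcases seekF_spec res s e' hs with ⟨hm', hallF⟩ | ⟨hs1, hs2, hs3, hallF⟩
      · rw [hm', if_pos (by norm_num : (-1 : Int) < 0)]
        have hnf : ∀ y ∈ pvSeg res s e', y ≠ -1 :=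
          pvSeg_nonfree_of res s e' hs (by omega)
            (fun j hj1 hj2 => by
              rcases lt_or_eq_of_le hj2 with h' | h'
              · exact hallF j hj1 h'
              · rw [h']; exact he3)
        have hfr : ∀ y ∈ pvSeg res (e' + 1) e, y = -1 :=
          pvSeg_allfree_of res (e' + 1) e (by omega) (by omega)
            (fun j hj1 hj2 => hallE j (by omega) hj2)
        have hpad : pvPad (pvSeg res s e) = pvSeg res s e := by
          rw [pvSeg_split res s e' e hs (by omega) he2 (by omega)]
          rw [pvPad_append_nonfree _ _ hnf, pvPad_allfree _ hfr]
        rw [hpad, pvRecompose res s e hs hse (by omega)]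
      · rw [if_neg (by omega : ¬ seek_free_index res s e' < 0)]
        set s' := seek_free_index res s e' with hS
        have hs'0 : 0 ≤ s' := by omega
        have hs'l : s' < (res.length : Int) := by omega
        rw [PySem.List.pySetD_of_nonneg _ _ hs'0, PySem.List.pySetD_of_nonneg _ _ he'0]
        set v := PySem.List.pyGetD res e' 0 with hv
        have hvE : v = res[e'.toNat]'(by omega) := by
          rw [hv]; exact PySem.List.pyGetD_eq_getElem res 0 he'0 he'l
        have hvne : v ≠ -1 := he3
        set res2 := (res.set s'.toNat v).set e'.toNat (-1) with hres2
        have hlen2 : res2.length = res.length := by simp [hres2]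
        have hne : e'.toNat ≠ s'.toNat := by omega
        have hgot : PySem.List.pyGetD res2 s' 0 = v := by
          rw [PySem.List.pyGetD_eq_getElem res2 0 hs'0 (by rw [hlen2]; exact hs'l)]
          simp only [hres2]
          rw [List.getElem_set_ne hne, List.getElem_set_self]
        have hphi : pvPhi res2 s' e' < pvPhi res s e := by
          unfold pvPhi
          rw [hgot, if_neg hvne]
          by_cases hss : s' = s
          · rw [← hss, if_pos hs3]
            omega
          · have hsne : PySem.List.pyGetD res s 0 ≠ -1 := hallF s (le_refl s) (by omega)
            rw [if_neg hsne]
            omega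
        rw [ih res2 s' e' hs'0 (by omega) (by rw [hlen2]; omega) (by omega)]
        -- rewrite the two untouched outer parts
        have htk : res2.take s'.toNat = res.take s.toNat ++ pvSeg res s (s' - 1) := by
          simp only [hres2]
          rw [pvTake_set _ _ _ _ (by omega), pvTake_set _ _ _ _ (le_refl _)]
          exact pvTake_decomp res s s' hs hs1
        have hdr : res2.drop (e' + 1).toNat
            = pvSeg res (e' + 1) e ++ res.drop (e + 1).toNat := by
          simp only [hres2]
          rw [pvDrop_set _ _ _ _ (by omega), pvDrop_set _ _ _ _ (by omega)]
          have := pvDrop_decomp res (e' + 1) (e + 1) (by omega) (by omega) (by omega)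
          rwa [show e + 1 - 1 = e from by ring] at this
        -- the middle segment of res2
        have hmid2 : pvSeg res2 s' e' = v :: (pvSeg res (s' + 1) (e' - 1) ++ [-1]) := by
          rw [pvSeg_split res2 s' s' e' hs'0 (by omega) (by omega) (by rw [hlen2]; omega)]
          rw [pvSeg_split res2 (s' + 1) (e' - 1) e' (by omega) (by omega) (by omega)
            (by rw [hlen2]; omega)]
          rw [show e' - 1 + 1 = e' from by ring]
          rw [pvSeg_singleton res2 s' hs'0 (by rw [hlen2]; omega)]
          rw [pvSeg_singleton res2 e' he'0 (by rw [hlen2]; omega)]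
          have h1 : res2[s'.toNat]'(by rw [hlen2]; omega) = v := by
            simp only [hres2]
            rw [List.getElem_set_ne hne, List.getElem_set_self]
          have h2 : res2[e'.toNat]'(by rw [hlen2]; omega) = -1 := by
            simp only [hres2]
            rw [List.getElem_set_self]
          have h3 : pvSeg res2 (s' + 1) (e' - 1) = pvSeg res (s' + 1) (e' - 1) := by
            apply pvSeg_ext _ _ _ _ (by rw [hlen2])
            intro j hj1 hj2
            simp only [hres2]
            rw [List.getElem?_set_ne (by omega), List.getElem?_set_ne (by omega)]
          rw [h1, h2, h3]
          simp
        -- the original segment decomposed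
        have hmid : pvSeg res s e
            = pvSeg res s (s' - 1)
              ++ ((-1 :: (pvSeg res (s' + 1) (e' - 1) ++ [v])) ++ pvSeg res (e' + 1) e) := by
          rw [pvSeg_split res s (s' - 1) e hs (by omega) (by omega) (by omega)]
          rw [show s' - 1 + 1 = s' from by ring]
          rw [pvSeg_split res s' e' e hs'0 (by omega) he2 (by omega)]
          rw [pvSeg_split res s' s' e' hs'0 (by omega) (by omega) (by omega)]
          rw [pvSeg_split res (s' + 1) (e' - 1) e' (by omega) (by omega) (by omega) (by omega)]
          rw [show e' - 1 + 1 = e' from by ring]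
          rw [pvSeg_singleton res s' hs'0 (by omega), pvSeg_singleton res e' he'0 (by omega)]
          have h1 : res[s'.toNat]'(by omega) = -1 := by
            rw [← PySem.List.pyGetD_eq_getElem res 0 hs'0 hs'l]; exact hs3
          rw [h1, ← hvE]
          simp
        have hNF : ∀ y ∈ pvSeg res s (s' - 1), y ≠ -1 :=
          pvSeg_nonfree_of res s (s' - 1) hs (by omega)
            (fun j hj1 hj2 => hallF j hj1 (by omega))
        have hFR : ∀ y ∈ pvSeg res (e' + 1) e, y = -1 :=
          pvSeg_allfree_of res (e' + 1) e (by omega) (by omega)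
            (fun j hj1 hj2 => hallE j (by omega) hj2)
        rw [htk, hdr, hmid2, hmid]
        rw [pvPad_append_nonfree _ _ hNF, pvPad_append_allfree _ _ hFR]
        rw [pvPad_swap _ _ hvne]
        simp [List.append_assoc]

theorem compact_eq_pad (xs : List Int) : compact_expanded_map xs = pvPad xs := by
  unfold compact_expanded_map
  rw [compact_loop_spec (xs.length + 2) xs 0 ((xs.length : Int) - 1) (le_refl 0)
    (by omega) (by omega) (by unfold pvPhi; split <;> omega)]
  rw [pvSeg_self]
  have h1 : ((xs.length : Int) - 1 + 1).toNat = xs.length := by omega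
  simp [h1]

-- ===== B-side: donor-queue characterisation of pvPack =====

-- the fill pass with the donor queue consumed structurally instead of by index
def pvFillQ : List Int → List Int → List Int
  | _, [] => []
  | ds, v :: rest =>
    if v != -1 then v :: pvFillQ ds rest
    else ds.headD 0 :: pvFillQ ds.tail rest

theorem pvFillLoop_eq_fillQ (ds : List Int) (l : List Int) :
    ∀ j : Int, 0 ≤ j → pvFillLoop ds l j = pvFillQ (ds.drop j.toNat) l := by
  induction l with
  | nil => intro j hj; rfl
  | cons v rest ih =>
    intro j hj
    by_cases hv : (v != -1) = true
    · simp only [pvFillLoop, pvFillQ, hv, if_pos]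
      rw [ih j hj]
    · simp only [pvFillLoop, pvFillQ, if_neg hv]
      have h1 : PySem.List.pyGetD ds j 0 = (ds.drop j.toNat).headD 0 := by
        rw [PySem.List.pyGetD_of_nonneg _ _ hj]
        rw [List.getD_eq_getElem?_getD, List.headD_eq_head?, List.head?_drop]
      have h2 : ds.drop (j + 1).toNat = (ds.drop j.toNat).tail := by
        rw [List.tail_drop]
        congr 1
        omega
      rw [h1, ih (j + 1) (by omega), h2]

theorem pvFillQ_length (ds l : List Int) : (pvFillQ ds l).length = l.length := by
  induction l generalizing ds with
  | nil => rfl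
  | cons v rest ih =>
    by_cases hv : (v != -1) = true
    · simp only [pvFillQ, hv, if_pos, List.length_cons, ih]
    · simp only [pvFillQ, if_neg hv, List.length_cons, ih]

theorem pvCnt_le (zs : List Int) : zs.countP (fun v => v != -1) ≤ zs.length :=
  List.countP_le_length

theorem pvPack_eq_fillQ (zs : List Int) :
    pvPack zs = pvFillQ
      ((zs.drop (zs.countP (fun v => v != -1))).reverse.filter (fun v => v != -1))
      (zs.take (zs.countP (fun v => v != -1))) := by
  induction zs using pvPack.induct with
  | case1 => simp [pvPack_nil, pvFillQ]
  | case5 x rest hx ih =>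
    have hxb : (x != -1) = true := by simpa using hx
    have hc : (x :: rest).countP (fun v => v != -1)
        = rest.countP (fun v => v != -1) + 1 := by
      simp [List.countP_cons, hxb]
    rw [pvPack_cons_nonfree _ _ hx, hc]
    simp only [List.take_succ_cons, List.drop_succ_cons]
    simp only [pvFillQ, hxb, if_pos]
    rw [ih]
  | case2 rest h =>
    have hr : rest = [] := List.getLast?_eq_none_iff.mp h
    subst hr
    simp [pvPack_free_none [] rfl, pvFillQ]
  | case3 rest h ih =>
    -- last of rest is -1; rest = u ++ [-1]
    obtain ⟨u, hu⟩ := List.getLast?_eq_some_iff.mp h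
    subst hu
    have hdl : (u ++ [-1]).dropLast = u := by simp
    rw [pvPack_free_last_free _ (by simpa using h)]
    rw [hdl] at ih ⊢
    rw [ih]
    have hm1b : ((-1 : Int) != -1) = false := by decide
    have hc1 : (-1 :: (u ++ [-1])).countP (fun v => v != -1)
        = u.countP (fun v => v != -1) := by
      rw [List.countP_cons, List.countP_append]
      simp
    have hc2 : (-1 :: u).countP (fun v => v != -1) = u.countP (fun v => v != -1) := by
      rw [List.countP_cons]; simp
    set k := u.countP (fun v => v != -1) with hk
    have hkle : k ≤ u.length := pvCnt_le u
    have ht : (-1 :: (u ++ [-1])).take k = (-1 :: u).take k := by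
      have : (-1 :: (u ++ [-1])) = (-1 :: u) ++ [-1] := by simp
      rw [this, List.take_append_of_le_length (by simp; omega)]
    have hd : (-1 :: (u ++ [-1])).drop k = (-1 :: u).drop k ++ [-1] := by
      have : (-1 :: (u ++ [-1])) = (-1 :: u) ++ [-1] := by simp
      rw [this, List.drop_append_of_le_length (by simp; omega)]
    rw [hc1, hc2, ht, hd]
    rw [List.reverse_append]
    simp
  | case4 rest y h hy ih =>
    -- last of rest is y ≠ -1; rest = u ++ [y]
    obtain ⟨u, hu⟩ := List.getLast?_eq_some_iff.mp h
    subst hu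
    have hdl : (u ++ [y]).dropLast = u := by simp
    rw [pvPack_free_last_nonfree _ y (by simpa using h) hy]
    rw [hdl] at ih ⊢
    rw [ih]
    have hyb : (y != -1) = true := by simpa using hy
    have hm1b : ((-1 : Int) != -1) = false := by decide
    set k := u.countP (fun v => v != -1) with hk
    have hkle : k ≤ u.length := pvCnt_le u
    have hc1 : (-1 :: (u ++ [y])).countP (fun v => v != -1) = k + 1 := by
      rw [List.countP_cons, List.countP_append]
      simp [hyb, hk]
    rw [hc1]
    have ht : (-1 :: (u ++ [y])).take (k + 1) = -1 :: u.take k := by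
      rw [List.take_succ_cons, List.take_append_of_le_length hkle]
    have hd : (-1 :: (u ++ [y])).drop (k + 1) = u.drop k ++ [y] := by
      rw [List.drop_succ_cons, List.drop_append_of_le_length hkle]
    rw [ht, hd, List.reverse_append]
    simp only [List.reverse_cons, List.reverse_nil, List.nil_append, List.singleton_append,
      List.filter_cons, hyb, if_pos]
    simp only [pvFillQ, hm1b, Bool.false_eq_true, if_false, List.headD_cons, List.tail_cons]

theorem pvPack_length_eq (zs : List Int) :
    (pvPack zs).length = zs.countP (fun v => v != -1) := by
  rw [pvPack_eq_fillQ, pvFillQ_length, List.length_take]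
  have := pvCnt_le zs
  omega

theorem pvFold_count (zs : List Int) :
    ∀ c : Int, zs.foldl (fun a v => if v != -1 then a + 1 else a) c
      = c + (zs.countP (fun v => v != -1) : Int) := by
  induction zs with
  | nil => intro c; simp
  | cons x rest ih =>
    intro c
    by_cases hx : (x != -1) = true
    · simp only [List.foldl_cons, hx, if_pos, List.countP_cons]
      rw [ih]
      push_cast
      ring
    · simp only [List.foldl_cons, List.countP_cons, if_neg hx]
      rw [ih]
      simp

theorem compact_alt_eq_pad (xs : List Int) : compact_expanded_map_alt xs = pvPad xs := by
  unfold compact_expanded_map_alt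
  set k := xs.countP (fun v => v != -1) with hk
  have hm : xs.foldl (fun a v => if v != -1 then a + 1 else a) 0 = (k : Int) := by
    rw [pvFold_count, ← hk]; simp
  simp only [hm, Int.toNat_natCast]
  rw [pvFillLoop_eq_fillQ _ _ 0 (le_refl 0)]
  simp only [Int.toNat_zero, List.drop_zero]
  rw [← pvPack_eq_fillQ]
  unfold pvPad
  rw [pvPack_length_eq, ← hk]

-- ===== VERDICT (by name: the statement is the Claim_ definition above) =====
theorem compact_expanded_map_spec : Claim_equal_compact_expanded_map := by
  intro xs _
  unfold Spec_compact_expanded_map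
  rw [compact_eq_pad, compact_alt_eq_pad]
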